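-- pv_equiv track=rewrite | github.com/CVKim/InflectionPointDetector | PeaksDetector.py | calculate_boundaries
-- ===== SOURCE A (Python) =====
-- def calculate_boundaries(contour, image_shape):
--     """경계선의 최상단과 최하단 계산"""
--     lstTopBoundary = [image_shape[0]] * image_shape[1]
--     lstBotBoundary = [-1] * image_shape[1]
--
--     iStartX = image_shape[1]
--     iEndX = -1
--
--     for pt in contour:
--         x = pt[0][0]
--         y = pt[0][1]
--
--         if y < lstTopBoundary[x]:
--             lstTopBoundary[x] = y
--         if y > lstBotBoundary[x]:
--             lstBotBoundary[x] = y
--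
--         iStartX = min(iStartX, x)
--         iEndX = max(iEndX, x)
--
--     return iStartX, iEndX, lstTopBoundary, lstBotBoundary
-- ===== SOURCE B (Python) =====
-- def _merge(a, b):
--     """Combine two boundary summaries: elementwise min of tops, max of bots,
--     min of start columns, max of end columns."""
--     return (min(a[0], b[0]), max(a[1], b[1]),
--             [min(u, v) for u, v in zip(a[2], b[2])],
--             [max(u, v) for u, v in zip(a[3], b[3])])
--
--
-- def _summary(pts, H, W):
--     """Boundary summary of a list of points, by divide and conquer."""
--     if not pts:
--         return W, -1, [H] * W, [-1] * W
--     if len(pts) == 1: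
--         x, y = pts[0][0][0], pts[0][0][1]
--         top = [H] * W
--         bot = [-1] * W
--         top[x] = y
--         bot[x] = y
--         return x, x, top, bot
--     mid = len(pts) // 2
--     return _merge(_summary(pts[:mid], H, W), _summary(pts[mid:], H, W))
--
--
-- def calculate_boundaries(contour, image_shape):
--     """Boundary summaries form a monoid under _merge; reduce the contour's
--     one-point summaries by divide and conquer, starting from the unit
--     (the summary of an empty contour)."""
--     H, W = image_shape
--     return _merge((W, -1, [H] * W, [-1] * W), _summary(contour, H, W))
-- ===== Notes on version B (the rewrite author's own statement) =====
-- stated objective: alternative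
-- what changed: A makes one pass updating two preallocated boundary arrays in place with conditional writes; B maps each contour point to a one-point boundary summary and reduces the summaries by divide and conquer with an elementwise min/max merge (a monoid reduction starting from the empty summary); Pre_ excludes only the inputs where A raises IndexError (a malformed point, or a column index outside [-W,W)).
import Mathlib
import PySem

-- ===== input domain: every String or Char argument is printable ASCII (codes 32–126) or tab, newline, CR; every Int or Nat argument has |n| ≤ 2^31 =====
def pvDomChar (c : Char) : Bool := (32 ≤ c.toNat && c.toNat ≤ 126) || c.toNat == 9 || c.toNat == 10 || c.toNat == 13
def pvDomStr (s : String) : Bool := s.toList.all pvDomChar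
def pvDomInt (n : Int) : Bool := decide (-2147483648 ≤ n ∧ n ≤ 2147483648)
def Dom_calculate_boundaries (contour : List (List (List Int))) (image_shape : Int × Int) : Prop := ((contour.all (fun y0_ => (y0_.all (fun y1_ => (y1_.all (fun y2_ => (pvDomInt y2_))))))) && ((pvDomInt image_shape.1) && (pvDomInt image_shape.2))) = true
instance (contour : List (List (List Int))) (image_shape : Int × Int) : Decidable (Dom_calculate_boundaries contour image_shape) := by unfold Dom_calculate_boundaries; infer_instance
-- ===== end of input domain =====

-- B replaces A's in-place per-point array updates by a divide-and-conquer monoid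
-- reduction: each point becomes a one-point boundary summary and summaries are
-- combined with an elementwise min/max merge; alternative structure, same results.

-- ===== PORT A =====
def calculate_boundaries (contour : List (List (List Int))) (image_shape : Int × Int) : Int × Int × List Int × List Int :=
  contour.foldl
    (fun (st : Int × Int × List Int × List Int) pt =>
      let p0 := PySem.List.pyGetD pt 0 []
      let x := PySem.List.pyGetD p0 0 0
      let y := PySem.List.pyGetD p0 1 0
      let top := if y < PySem.List.pyGetD st.2.2.1 x 0 then PySem.List.pySetD st.2.2.1 x y else st.2.2.1
      let bot := if y > PySem.List.pyGetD st.2.2.2 x 0 then PySem.List.pySetD st.2.2.2 x y else st.2.2.2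
      (min st.1 x, max st.2.1 x, top, bot))
    (image_shape.2, -1,
     List.replicate image_shape.2.toNat image_shape.1,
     List.replicate image_shape.2.toNat (-1))

-- ===== PORT B =====
def pvMergeB (a b : Int × Int × List Int × List Int) : Int × Int × List Int × List Int :=
  (min a.1 b.1, max a.2.1 b.2.1,
   List.zipWith min a.2.2.1 b.2.2.1, List.zipWith max a.2.2.2 b.2.2.2)

-- fuel = number of points; a totality guard only (the recursion halves the list)
def pvSummary : Int → Int → Nat → List (List (List Int)) → Int × Int × List Int × List Int
  | H, W, 0, _ =>
    (W, -1, List.replicate W.toNat H, List.replicate W.toNat (-1))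
  | H, W, fuel + 1, pts =>
    if pts.length = 0 then
      (W, -1, List.replicate W.toNat H, List.replicate W.toNat (-1))
    else if pts.length = 1 then
      let p0 := PySem.List.pyGetD (PySem.List.pyGetD pts 0 []) 0 []
      let x := PySem.List.pyGetD p0 0 0
      let y := PySem.List.pyGetD p0 1 0
      (x, x, PySem.List.pySetD (List.replicate W.toNat H) x y,
             PySem.List.pySetD (List.replicate W.toNat (-1)) x y)
    else
      pvMergeB (pvSummary H W fuel (List.take (pts.length / 2) pts))
               (pvSummary H W fuel (List.drop (pts.length / 2) pts))

def calculate_boundaries_alt (contour : List (List (List Int))) (image_shape : Int × Int) : Int × Int × List Int × List Int :=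
  pvMergeB (image_shape.2, -1,
            List.replicate image_shape.2.toNat image_shape.1,
            List.replicate image_shape.2.toNat (-1))
           (pvSummary image_shape.1 image_shape.2 contour.length contour)

-- ===== PRECONDITION & SPEC =====
-- Pre_ excludes exactly the inputs on which A raises IndexError: a point pt that is
-- empty or whose pt[0] has fewer than two entries, or whose column index pt[0][0]
-- lies outside [-W, W).  A returns on every other input.
def pvValidPt (W : Int) (pt : List (List Int)) : Bool :=
  match pt with
  | (x :: _ :: _) :: _ => decide (-W ≤ x ∧ x < W)
  | _ => false

def Pre_calculate_boundaries (contour : List (List (List Int))) (image_shape : Int × Int) : Prop :=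
  contour.all (pvValidPt image_shape.2) = true
instance (contour : List (List (List Int))) (image_shape : Int × Int) : Decidable (Pre_calculate_boundaries contour image_shape) := by unfold Pre_calculate_boundaries; infer_instance

def pvWitness_calculate_boundaries : List (List (List Int)) × (Int × Int) :=
  ([[[1, 3]], [[-2, 7]], [[1, 5]]], (10, 4))

def Spec_calculate_boundaries (contour : List (List (List Int))) (image_shape : Int × Int) (out : Int × Int × List Int × List Int) : Prop := out = calculate_boundaries_alt contour image_shape
instance (contour : List (List (List Int))) (image_shape : Int × Int) (out : Int × Int × List Int × List Int) : Decidable (Spec_calculate_boundaries contour image_shape out) := by unfold Spec_calculate_boundaries; infer_instance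

-- ===== CLAIM (what is proved, stated in full; the proofs are below) =====
def Claim_equal_calculate_boundaries : Prop := ∀ (contour : List (List (List Int))) (image_shape : Int × Int), Dom_calculate_boundaries contour image_shape → Pre_calculate_boundaries contour image_shape → Spec_calculate_boundaries contour image_shape (calculate_boundaries contour image_shape)

-- ===== LEMMAS AND PROOFS =====

-- proof-side names for A's loop data
def pvX (pt : List (List Int)) : Int := PySem.List.pyGetD (PySem.List.pyGetD pt 0 []) 0 0
def pvY (pt : List (List Int)) : Int := PySem.List.pyGetD (PySem.List.pyGetD pt 0 []) 1 0

def pvAstep (st : Int × Int × List Int × List Int) (pt : List (List Int)) : Int × Int × List Int × List Int :=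
  (min st.1 (pvX pt), max st.2.1 (pvX pt),
   (if pvY pt < PySem.List.pyGetD st.2.2.1 (pvX pt) 0 then PySem.List.pySetD st.2.2.1 (pvX pt) (pvY pt) else st.2.2.1),
   (if pvY pt > PySem.List.pyGetD st.2.2.2 (pvX pt) 0 then PySem.List.pySetD st.2.2.2 (pvX pt) (pvY pt) else st.2.2.2))

def pvUnit (H W : Int) : Int × Int × List Int × List Int :=
  (W, -1, List.replicate W.toNat H, List.replicate W.toNat (-1))

-- loop invariant: lists have length W, tops never exceed H, bots never below -1,
-- start never above W, end never below -1
def pvWF (H W : Int) (st : Int × Int × List Int × List Int) : Prop :=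
  st.2.2.1.length = W.toNat ∧ st.2.2.2.length = W.toNat ∧
  (∀ j, j < W.toNat → st.2.2.1.getD j 0 ≤ H) ∧
  (∀ j, j < W.toNat → -1 ≤ st.2.2.2.getD j 0) ∧
  st.1 ≤ W ∧ -1 ≤ st.2.1

lemma pvX_cons (x y : Int) (r : List Int) (rs : List (List Int)) : pvX ((x :: y :: r) :: rs) = x := by
  simp [pvX, PySem.List.pyGetD_zero_cons]

lemma pvY_cons (x y : Int) (r : List Int) (rs : List (List Int)) : pvY ((x :: y :: r) :: rs) = y := by
  unfold pvY
  rw [PySem.List.pyGetD_zero_cons, PySem.List.pyGetD_eq_getElem _ _ (by omega) (by simp)]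
  simp

lemma pvValid_shape (W : Int) (pt : List (List Int)) (h : pvValidPt W pt = true) :
    ∃ x y r rs, pt = (x :: y :: r) :: rs ∧ -W ≤ x ∧ x < W := by
  unfold pvValidPt at h
  match pt, h with
  | (x :: y :: r) :: rs, h => exact ⟨x, y, r, rs, rfl, by simpa using h⟩

lemma pvMod_val (x W : Int) (h1 : -W ≤ x) (h2 : x < W) :
    PySem.Int.mod x W = if x < 0 then x + W else x := by
  have h0 : 0 < W := by omega
  rw [PySem.Int.mod_eq_emod_of_pos h0]
  split_ifs with hx
  · have : x % W = (x + W) % W := by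
      conv_rhs => rw [show x + W = x + W * 1 by ring]
      rw [Int.add_mul_emod_self_left]
    rw [this, Int.emod_eq_of_lt (by omega) (by omega)]
  · exact Int.emod_eq_of_lt (by omega) (by omega)

lemma pvMod_bounds (x W : Int) (h1 : -W ≤ x) (h2 : x < W) :
    0 ≤ PySem.Int.mod x W ∧ PySem.Int.mod x W < W := by
  rw [pvMod_val x W h1 h2]
  split <;> omega

lemma pvGetD_bridge (t : List Int) (x W d : Int) (h1 : -W ≤ x) (h2 : x < W)
    (hl : t.length = W.toNat) :
    PySem.List.pyGetD t x d = t.getD (PySem.Int.mod x W).toNat d := by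
  rcases lt_or_ge x 0 with hx | hx
  · rw [pvMod_val x W h1 h2, if_pos hx]
    simp only [PySem.List.pyGetD, PySem.List.pyGet?, PySem.List.pyIdx?, hl,
      List.getD_eq_getElem?_getD]
    rw [if_neg (by omega), if_pos (by omega)]
    simp only [Option.bind_some]
    congr 2
    omega
  · rw [pvMod_val x W h1 h2, if_neg (by omega)]
    simp only [PySem.List.pyGetD, PySem.List.pyGet?, PySem.List.pyIdx?, hl,
      List.getD_eq_getElem?_getD]
    rw [if_pos hx, if_pos (by omega)]
    simp only [Option.bind_some]

lemma pvSetD_bridge (t : List Int) (x W v : Int) (h1 : -W ≤ x) (h2 : x < W)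
    (hl : t.length = W.toNat) :
    PySem.List.pySetD t x v = t.set (PySem.Int.mod x W).toNat v := by
  rcases lt_or_ge x 0 with hx | hx
  · rw [pvMod_val x W h1 h2, if_pos hx]
    simp only [PySem.List.pySetD, PySem.List.pySet?, PySem.List.pyIdx?, hl]
    rw [if_neg (by omega), if_pos (by omega)]
    simp only [Option.map_some, Option.getD_some]
    congr 1
    omega
  · rw [pvMod_val x W h1 h2, if_neg (by omega)]
    simp only [PySem.List.pySetD, PySem.List.pySet?, PySem.List.pyIdx?, hl]
    rw [if_pos hx, if_pos (by omega)]
    simp only [Option.map_some, Option.getD_some]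

lemma pv_getD_set (t : List Int) (i j : Nat) (v : Int) (hj : j < t.length) :
    (t.set i v).getD j 0 = if i = j then v else t.getD j 0 := by
  simp only [List.getD_eq_getElem?_getD, List.getElem?_set]
  split_ifs with hij hlt
  · simp
  · omega
  · rfl

-- zipWith of an associative operation is associative
lemma pv_zipWith_assoc (f : Int → Int → Int) (hf : ∀ a b c, f (f a b) c = f a (f b c)) :
    ∀ (a b c : List Int), List.zipWith f (List.zipWith f a b) c = List.zipWith f a (List.zipWith f b c) := by
  intro a
  induction a with
  | nil => intro b c; simp
  | cons x a ih =>
    intro b c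
    cases b with
    | nil => simp
    | cons y b =>
      cases c with
      | nil => simp
      | cons z c => simp [ih, hf]

lemma pvMergeB_assoc (a b c : Int × Int × List Int × List Int) :
    pvMergeB (pvMergeB a b) c = pvMergeB a (pvMergeB b c) := by
  unfold pvMergeB
  refine congrArg₂ _ (min_assoc ..) (congrArg₂ _ (max_assoc ..) (congrArg₂ _ ?_ ?_))
  · exact pv_zipWith_assoc min (fun a b c => min_assoc a b c) _ _ _
  · exact pv_zipWith_assoc max (fun a b c => max_assoc a b c) _ _ _

-- merging the unit on the right is the identity on well-formed states
lemma pvMergeB_unit (H W : Int) (st : Int × Int × List Int × List Int) (h : pvWF H W st) :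
    pvMergeB st (pvUnit H W) = st := by
  obtain ⟨s, e, t, b⟩ := st
  obtain ⟨ht, hb, htH, hbN, hs, he⟩ := h
  simp only at ht hb htH hbN hs he
  unfold pvMergeB pvUnit
  refine congrArg₂ _ (min_eq_left hs) (congrArg₂ _ (max_eq_left he) (congrArg₂ _ ?_ ?_))
  · apply List.ext_getElem (by simp [ht])
    intro i h1 h2
    have hi : i < W.toNat := by simpa [ht] using h2
    have := htH i hi
    rw [List.getD_eq_getElem _ _ h2] at this
    simp only [List.getElem_zipWith, List.getElem_replicate]
    omega
  · apply List.ext_getElem (by simp [hb])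
    intro i h1 h2
    have hi : i < W.toNat := by simpa [hb] using h2
    have := hbN i hi
    rw [List.getD_eq_getElem _ _ h2] at this
    simp only [List.getElem_zipWith, List.getElem_replicate]
    omega

-- A's single step equals merging the point's one-point summary
lemma pvStep_eq_merge (H W : Int) (st : Int × Int × List Int × List Int)
    (pt : List (List Int)) (hv : pvValidPt W pt = true) (h : pvWF H W st) :
    pvAstep st pt =
      pvMergeB st (pvX pt, pvX pt,
        PySem.List.pySetD (List.replicate W.toNat H) (pvX pt) (pvY pt),
        PySem.List.pySetD (List.replicate W.toNat (-1)) (pvX pt) (pvY pt)) := by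
  obtain ⟨x, y, r, rs, hpt, hx1, hx2⟩ := pvValid_shape W pt hv
  subst hpt
  obtain ⟨s, e, t, b⟩ := st
  obtain ⟨ht, hb, htH, hbN, hs, he⟩ := h
  simp only at ht hb htH hbN hs he
  have hmod := pvMod_bounds x W hx1 hx2
  unfold pvAstep pvMergeB
  rw [pvX_cons, pvY_cons]
  simp only
  rw [pvGetD_bridge t x W 0 hx1 hx2 ht, pvGetD_bridge b x W 0 hx1 hx2 hb,
      pvSetD_bridge t x W y hx1 hx2 ht, pvSetD_bridge b x W y hx1 hx2 hb,
      pvSetD_bridge _ x W y hx1 hx2 (by simp),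
      pvSetD_bridge _ x W y hx1 hx2 (by simp)]
  set i : Nat := (PySem.Int.mod x W).toNat with hi
  have hiW : i < W.toNat := by omega
  refine congrArg₂ _ rfl (congrArg₂ _ rfl (congrArg₂ _ ?_ ?_))
  · split_ifs with hlt
    · apply List.ext_getElem (by simp [ht])
      intro j h1 h2
      have hjW : j < W.toNat := by simp only [List.length_zipWith, List.length_set, List.length_replicate, ht] at h2; omega
      rw [List.getElem_set, List.getElem_zipWith, List.getElem_set]
      have hgd : t.getD i 0 = t[i]'(by omega) := List.getD_eq_getElem t 0 (by omega)
      rw [hgd] at hlt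
      have hbd := htH j hjW
      rw [List.getD_eq_getElem t 0 (by omega)] at hbd
      by_cases hij : i = j
      · subst hij
        simp only [List.getElem_replicate]
        rw [min_def]
        split_ifs <;> omega
      · simp only [if_neg hij, List.getElem_replicate]
        rw [min_def]
        split_ifs <;> omega
    · apply List.ext_getElem (by simp [ht])
      intro j h1 h2
      have hjW : j < W.toNat := by simp only [List.length_zipWith, List.length_set, List.length_replicate, ht] at h2; omega
      rw [List.getElem_zipWith, List.getElem_set]
      have hgd : t.getD i 0 = t[i]'(by omega) := List.getD_eq_getElem t 0 (by omega)
      rw [hgd] at hlt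
      have hbd := htH j hjW
      rw [List.getD_eq_getElem t 0 (by omega)] at hbd
      by_cases hij : i = j
      · subst hij
        simp only [List.getElem_replicate]
        rw [min_def]
        split_ifs <;> omega
      · simp only [if_neg hij, List.getElem_replicate]
        rw [min_def]
        split_ifs <;> omega
  · split_ifs with hlt
    · apply List.ext_getElem (by simp [hb])
      intro j h1 h2
      have hjW : j < W.toNat := by simp only [List.length_zipWith, List.length_set, List.length_replicate, hb] at h2; omega
      rw [List.getElem_set, List.getElem_zipWith, List.getElem_set]
      have hgd : b.getD i 0 = b[i]'(by omega) := List.getD_eq_getElem b 0 (by omega)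
      rw [hgd] at hlt
      have hbd := hbN j hjW
      rw [List.getD_eq_getElem b 0 (by omega)] at hbd
      by_cases hij : i = j
      · subst hij
        simp only [List.getElem_replicate]
        rw [max_def]
        split_ifs <;> omega
      · simp only [if_neg hij, List.getElem_replicate]
        rw [max_def]
        split_ifs <;> omega
    · apply List.ext_getElem (by simp [hb])
      intro j h1 h2
      have hjW : j < W.toNat := by simp only [List.length_zipWith, List.length_set, List.length_replicate, hb] at h2; omega
      rw [List.getElem_zipWith, List.getElem_set]
      have hgd : b.getD i 0 = b[i]'(by omega) := List.getD_eq_getElem b 0 (by omega)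
      rw [hgd] at hlt
      have hbd := hbN j hjW
      rw [List.getD_eq_getElem b 0 (by omega)] at hbd
      by_cases hij : i = j
      · subst hij
        simp only [List.getElem_replicate]
        rw [max_def]
        split_ifs <;> omega
      · simp only [if_neg hij, List.getElem_replicate]
        rw [max_def]
        split_ifs <;> omega

-- the step preserves the invariant
lemma pvStep_WF (H W : Int) (st : Int × Int × List Int × List Int)
    (pt : List (List Int)) (hv : pvValidPt W pt = true) (h : pvWF H W st) :
    pvWF H W (pvAstep st pt) := by
  obtain ⟨x, y, r, rs, hpt, hx1, hx2⟩ := pvValid_shape W pt hv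
  subst hpt
  obtain ⟨s, e, t, b⟩ := st
  obtain ⟨ht, hb, htH, hbN, hs, he⟩ := h
  simp only at ht hb htH hbN hs he
  have hmod := pvMod_bounds x W hx1 hx2
  unfold pvAstep
  rw [pvX_cons, pvY_cons, pvGetD_bridge t x W 0 hx1 hx2 ht, pvGetD_bridge b x W 0 hx1 hx2 hb,
      pvSetD_bridge t x W y hx1 hx2 ht, pvSetD_bridge b x W y hx1 hx2 hb]
  set i : Nat := (PySem.Int.mod x W).toNat with hi
  have hiW : i < W.toNat := by omega
  refine ⟨?_, ?_, ?_, ?_, by simp only; omega, by simp only; omega⟩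
  · simp only
    split <;> simp [ht]
  · simp only
    split <;> simp [hb]
  · simp only
    intro j hj
    split_ifs with hlt
    · rw [pv_getD_set t i j y (by omega)]
      split_ifs with hij
      · have := htH i hiW
        omega
      · exact htH j hj
    · exact htH j hj
  · simp only
    intro j hj
    split_ifs with hlt
    · rw [pv_getD_set b i j y (by omega)]
      split_ifs with hij
      · have := hbN i hiW
        omega
      · exact hbN j hj
    · exact hbN j hj

lemma pvFoldl_WF (H W : Int) (pts : List (List (List Int))) :
    ∀ st, (∀ pt ∈ pts, pvValidPt W pt = true) → pvWF H W st →
      pvWF H W (pts.foldl pvAstep st) := by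
  induction pts with
  | nil => intro st _ h; exact h
  | cons pt pts ih =>
    intro st hv h
    rw [List.foldl_cons]
    exact ih _ (fun q hq => hv q (by simp [hq]))
      (pvStep_WF H W st pt (hv pt (by simp)) h)

-- main induction: folding A's step from any well-formed state is merging B's summary
lemma pv_main (H W : Int) :
    ∀ (n : Nat) (pts : List (List (List Int))), pts.length ≤ n →
      (∀ pt ∈ pts, pvValidPt W pt = true) →
      ∀ st, pvWF H W st →
        pts.foldl pvAstep st = pvMergeB st (pvSummary H W n pts) := by
  intro n
  induction n with
  | zero =>
    intro pts hlen hv st hwf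
    obtain rfl : pts = [] := List.length_eq_zero_iff.mp (by omega)
    exact (pvMergeB_unit H W st hwf).symm
  | succ n ih =>
    intro pts hlen hv st hwf
    by_cases h0 : pts.length = 0
    · obtain rfl : pts = [] := List.length_eq_zero_iff.mp h0
      simp only [pvSummary, List.length_nil]
      exact (pvMergeB_unit H W st hwf).symm
    · by_cases h1 : pts.length = 1
      · obtain ⟨pt, rfl⟩ := List.length_eq_one_iff.mp h1
        simp only [pvSummary, List.length_cons, List.length_nil]
        rw [List.foldl_cons, List.foldl_nil]
        have hpt0 : PySem.List.pyGetD [pt] 0 [] = pt := PySem.List.pyGetD_zero_cons ..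
        rw [hpt0]
        exact pvStep_eq_merge H W st pt (hv pt (by simp)) hwf
      · have h2 : 2 ≤ pts.length := by omega
        set mid : Nat := pts.length / 2 with hmid
        have hsplit : pts.take mid ++ pts.drop mid = pts := List.take_append_drop mid pts
        have hvt : ∀ pt ∈ pts.take mid, pvValidPt W pt = true :=
          fun pt hpt => hv pt ((List.take_sublist mid pts).subset hpt)
        have hvd : ∀ pt ∈ pts.drop mid, pvValidPt W pt = true :=
          fun pt hpt => hv pt ((List.drop_sublist mid pts).subset hpt)
        have hlt : (pts.take mid).length ≤ n := by
          rw [List.length_take]; omega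
        have hld : (pts.drop mid).length ≤ n := by
          rw [List.length_drop]; omega
        have e1 : pts.foldl pvAstep st =
            (pts.drop mid).foldl pvAstep ((pts.take mid).foldl pvAstep st) := by
          conv_lhs => rw [← hsplit]
          rw [List.foldl_append]
        rw [e1,
            ih (pts.drop mid) hld hvd _ (pvFoldl_WF H W (pts.take mid) st hvt hwf),
            ih (pts.take mid) hlt hvt st hwf,
            pvMergeB_assoc]
        congr 1
        rw [pvSummary]
        rw [if_neg h0, if_neg h1, ← hmid]

lemma pvUnit_WF (H W : Int) : pvWF H W (pvUnit H W) := by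
  refine ⟨by simp [pvUnit], by simp [pvUnit], ?_, ?_, le_refl _, le_refl _⟩
  · intro j hj
    simp [pvUnit, hj]
  · intro j hj
    simp [pvUnit, hj]

-- ===== VERDICT (by name: the statement is the Claim_ definition above) =====
theorem calculate_boundaries_spec : Claim_equal_calculate_boundaries := by
  intro contour image_shape _ pre
  obtain ⟨H, W⟩ := image_shape
  unfold Spec_calculate_boundaries
  have hv : ∀ pt ∈ contour, pvValidPt W pt = true :=
    fun pt hpt => List.all_eq_true.mp pre pt hpt
  have hA : calculate_boundaries contour (H, W) =
      contour.foldl pvAstep (pvUnit H W) := rfl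
  have hB : calculate_boundaries_alt contour (H, W) =
      pvMergeB (pvUnit H W) (pvSummary H W contour.length contour) := rfl
  rw [hA, hB, pv_main H W contour.length contour (le_refl _) hv (pvUnit H W) (pvUnit_WF H W)]
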